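-- pv_equiv track=rewrite | github.com/Xiuyuan7/Python-Code-Run-Test | 面经题测试/CodeSignal 题库/前两题/check_zigzag.py | solution
-- ===== SOURCE A (Python) =====
-- def solution(nums):
--     result = []
--
--     for i in range(2, len(nums)):
--         left, mid, right = nums[i - 2], nums[i - 1], nums[i]
--         if mid > left and mid > right or mid < left and mid < right:
--             result.append(1)
--         else:
--             result.append(0)
--
--     return result
-- ===== SOURCE B (Python) =====
-- def solution(nums):
--     d = [b - a for a, b in zip(nums, nums[1:])]
--     return [1 if x * y < 0 else 0 for x, y in zip(d, d[1:])]
-- ===== Notes on version B (the rewrite author's own statement) =====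
-- stated objective: alternative
-- what changed: Replaces the indexed triple loop with four comparisons by a difference table followed by a strict opposite-sign (product < 0) pass over adjacent differences.
import Mathlib
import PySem

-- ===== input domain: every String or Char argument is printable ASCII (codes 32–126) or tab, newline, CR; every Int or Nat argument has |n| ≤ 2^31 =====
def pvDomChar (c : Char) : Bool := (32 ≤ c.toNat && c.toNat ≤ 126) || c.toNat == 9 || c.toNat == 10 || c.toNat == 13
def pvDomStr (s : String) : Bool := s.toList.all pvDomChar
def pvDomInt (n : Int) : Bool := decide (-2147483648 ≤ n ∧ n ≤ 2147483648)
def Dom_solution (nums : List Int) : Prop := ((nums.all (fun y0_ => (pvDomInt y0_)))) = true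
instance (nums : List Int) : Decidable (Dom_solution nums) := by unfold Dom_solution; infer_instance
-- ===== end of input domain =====

-- B replaces the indexed four-comparison triple loop by a difference table and a strict opposite-sign pass (alternative decomposition, same cost).

-- ===== PORT A =====
-- literal port of A's index loop; nums[i-2], nums[i-1], nums[i] are always in range for i ∈ range(2, len), so pyGetD's default is never used
def solution (nums : List Int) : List Int :=
  (PySem.List.pyRange 2 (nums.length : Int)).foldl
    (fun result i =>
      let left := PySem.List.pyGetD nums (i - 2) 0
      let mid := PySem.List.pyGetD nums (i - 1) 0
      let right := PySem.List.pyGetD nums i 0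
      if (mid > left ∧ mid > right) ∨ (mid < left ∧ mid < right) then result ++ [1]
      else result ++ [0]) []

-- ===== PORT B =====
-- nums[1:] / d[1:] are ported as .tail (exact for every list)
def solution_alt (nums : List Int) : List Int :=
  let d := (nums.zip nums.tail).map (fun p => p.2 - p.1)
  (d.zip d.tail).map (fun p => if p.1 * p.2 < 0 then 1 else 0)

-- ===== PRECONDITION & SPEC =====
def Spec_solution (nums : List Int) (out : List Int) : Prop := out = solution_alt nums
instance (nums : List Int) (out : List Int) : Decidable (Spec_solution nums out) := by unfold Spec_solution; infer_instance

-- ===== CLAIM (what is proved, stated in full; the proofs are below) =====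
def Claim_equal_solution : Prop := ∀ (nums : List Int), Dom_solution nums → Spec_solution nums (solution nums)

-- ===== LEMMAS AND PROOFS =====

theorem pyRange_add_map (m : Nat) (a : Int) :
    PySem.List.pyRange a (a + m) = (List.range m).map (fun k : Nat => a + (Nat.cast k : Int)) := by
  induction m with
  | zero => simp [PySem.List.pyRange]
  | succ k ih =>
    have h : a + ((k : Int) + 1) = (a + (k : Int)) + 1 := by ring
    rw [List.range_succ, show ((k + 1 : Nat) : Int) = (k : Int) + 1 by push_cast; ring, h,
        PySem.List.pyRange_one_succ_right (by omega), ih]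
    simp

theorem cond_iff (a b c : Int) :
    ((b > a ∧ b > c) ∨ (b < a ∧ b < c)) ↔ (b - a) * (c - b) < 0 := by
  rw [mul_neg_iff]
  omega

theorem solution_spec_aux (nums : List Int) : solution nums = solution_alt nums := by
  unfold solution solution_alt
  rw [show (fun (result : List Int) (i : Int) =>
      let left := PySem.List.pyGetD nums (i - 2) 0
      let mid := PySem.List.pyGetD nums (i - 1) 0
      let right := PySem.List.pyGetD nums i 0
      if (mid > left ∧ mid > right) ∨ (mid < left ∧ mid < right) then result ++ [1]
      else result ++ [0]) =
    (fun (result : List Int) (i : Int) => result ++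
      [if (PySem.List.pyGetD nums (i - 1) 0 > PySem.List.pyGetD nums (i - 2) 0 ∧
           PySem.List.pyGetD nums (i - 1) 0 > PySem.List.pyGetD nums i 0) ∨
          (PySem.List.pyGetD nums (i - 1) 0 < PySem.List.pyGetD nums (i - 2) 0 ∧
           PySem.List.pyGetD nums (i - 1) 0 < PySem.List.pyGetD nums i 0) then 1 else 0])
    from funext fun r => funext fun i => by dsimp only; split <;> rfl]
  rw [PySem.List.foldl_append_singleton_eq_map, List.nil_append]
  match nums with
  | [] => rfl
  | [a] => rfl
  | a :: b :: rest =>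
    rw [show (((a :: b :: rest).length : Nat) : Int) = (2 : Int) + (rest.length : Int) by
          push_cast [List.length_cons]; ring,
        pyRange_add_map, List.map_map]
    apply List.ext_getElem
    · simp
    · intro k h1 h2
      have hk : k < rest.length := by simpa using h1
      simp only [List.getElem_map, Function.comp_apply, List.getElem_range,
        List.getElem_zip, List.getElem_tail, List.tail_cons]
      have hlt0 : (0 : Int) ≤ (2 : Int) + (k : Int) - 2 := by omega
      have g0 : PySem.List.pyGetD (a :: b :: rest) ((2 : Int) + (k : Int) - 2) 0 =
          (a :: b :: rest).getD k 0 := by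
        rw [PySem.List.pyGetD_of_nonneg _ _ (by omega)]
        congr 1; omega
      have g1 : PySem.List.pyGetD (a :: b :: rest) ((2 : Int) + (k : Int) - 1) 0 =
          (a :: b :: rest).getD (k + 1) 0 := by
        rw [PySem.List.pyGetD_of_nonneg _ _ (by omega)]
        congr 1; omega
      have g2 : PySem.List.pyGetD (a :: b :: rest) ((2 : Int) + (k : Int)) 0 =
          (a :: b :: rest).getD (k + 2) 0 := by
        rw [PySem.List.pyGetD_of_nonneg _ _ (by omega)]
        congr 1; omega
      rw [g0, g1, g2]
      have e0 : (a :: b :: rest).getD k 0 = (a :: b :: rest)[k]'(by simp; omega) := by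
        rw [List.getD_eq_getElem]
      have e1 : (a :: b :: rest).getD (k + 1) 0 = (a :: b :: rest)[k + 1]'(by simp; omega) := by
        rw [List.getD_eq_getElem]
      have e2 : (a :: b :: rest).getD (k + 2) 0 = (a :: b :: rest)[k + 2]'(by simp; omega) := by
        rw [List.getD_eq_getElem]
      rw [e0, e1, e2]
      rw [if_congr (cond_iff _ _ _) rfl rfl]
      simp [List.getElem_cons_succ]

-- ===== VERDICT (by name: the statement is the Claim_ definition above) =====
theorem solution_spec : Claim_equal_solution := by
  intro nums _
  exact solution_spec_aux nums
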